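-- pv_equiv track=rewrite | github.com/WNjihia/data-structures-and-algorithms | pure_recursion.py | collectOddValues
-- ===== SOURCE A (Python) =====
-- def collectOddValues(arr):
--     oddValues = []
--
--     if len(arr) == 0:
--         return oddValues;
--
--     if arr[0] % 2 != 0:
--         oddValues.append(arr[0])
--
--     del arr[0]
--
--     oddValues = oddValues + collectOddValues(arr)
--     return oddValues
-- ===== SOURCE B (Python) =====
-- def collectOddValues(arr):
--     # Iterative loop with an accumulator; like A it empties arr in place
--     # (it deletes from the front each step), returning odds in order.
--     oddValues = []
--     while len(arr) != 0:
--         if arr[0] % 2 != 0: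
--             oddValues.append(arr[0])
--         del arr[0]
--     return oddValues
-- ===== Notes on version B (the rewrite author's own statement) =====
-- stated objective: simpler
-- what changed: Replaced the head-recursion with list concatenation by an iterative loop that appends matches to a single accumulator (still deleting arr[0] each step, so arr is emptied in place like A).
import Mathlib
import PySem

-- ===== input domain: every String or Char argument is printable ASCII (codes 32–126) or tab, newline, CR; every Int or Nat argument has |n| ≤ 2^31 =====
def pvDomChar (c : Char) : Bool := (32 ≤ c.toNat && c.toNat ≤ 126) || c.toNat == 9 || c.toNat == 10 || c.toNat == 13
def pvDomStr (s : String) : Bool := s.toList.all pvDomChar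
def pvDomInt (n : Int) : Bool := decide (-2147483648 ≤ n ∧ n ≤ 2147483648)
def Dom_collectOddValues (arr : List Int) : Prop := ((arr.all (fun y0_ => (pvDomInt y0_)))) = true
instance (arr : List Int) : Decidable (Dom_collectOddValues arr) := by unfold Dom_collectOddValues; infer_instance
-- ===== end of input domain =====

-- B replaces A's head-recursion with an iterative accumulator loop (simpler);
-- both programs empty the mutable Python argument in place — the equivalence
-- proved here is about the RETURN value only.


-- ===== PORT A =====
-- A: if empty return []; maybe append arr[0]; delete head; recurse and concatenate.
def collectOddValues (arr : List Int) : List Int :=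
  match arr with
  | [] => []
  | x :: rest =>
    (if PySem.Int.mod x 2 ≠ 0 then [x] else []) ++ collectOddValues rest

-- ===== PORT B =====
-- B: while-loop over the list, appending odd heads to one accumulator.
def collectOddValues_altLoop (arr : List Int) (oddValues : List Int) : List Int :=
  match arr with
  | [] => oddValues
  | x :: rest =>
    collectOddValues_altLoop rest
      (if PySem.Int.mod x 2 ≠ 0 then oddValues ++ [x] else oddValues)

def collectOddValues_alt (arr : List Int) : List Int :=
  collectOddValues_altLoop arr []

-- ===== PRECONDITION & SPEC =====
def Spec_collectOddValues (arr : List Int) (out : List Int) : Prop := out = collectOddValues_alt arr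
instance (arr : List Int) (out : List Int) : Decidable (Spec_collectOddValues arr out) := by unfold Spec_collectOddValues; infer_instance

-- ===== CLAIM (what is proved, stated in full; the proofs are below) =====
def Claim_equal_collectOddValues : Prop := ∀ (arr : List Int), Dom_collectOddValues arr → Spec_collectOddValues arr (collectOddValues arr)

-- ===== LEMMAS AND PROOFS =====
theorem altLoop_acc (arr : List Int) (acc : List Int) :
    collectOddValues_altLoop arr acc = acc ++ collectOddValues arr := by
  induction arr generalizing acc with
  | nil => simp [collectOddValues_altLoop, collectOddValues]
  | cons x rest ih =>
    simp only [collectOddValues_altLoop, collectOddValues, ih]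
    split_ifs <;> simp

-- ===== VERDICT (by name: the statement is the Claim_ definition above) =====
theorem collectOddValues_spec : Claim_equal_collectOddValues := by
  intro arr _
  unfold Spec_collectOddValues collectOddValues_alt
  simp [altLoop_acc]
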